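-- pv_equiv track=rewrite | github.com/hieudoanm/sandbox | packages/python.org/lodash/libs/math.py | min_by
-- ===== SOURCE A (Python) =====
-- def min(numbers):
--     """
--     min
--     """
--     if len(numbers) == 0:
--         return
--     min_value = float("inf")
--     for number in numbers:
--         if number < min_value:
--             min_value = number
--     return min_value
--
-- def min_by(objects, iteratee):
--     """
--     min_by
--     """
--     if len(objects) == 0:
--         return
--     numbers = []
--     for obj in objects:
--         number = obj[iteratee]
--         numbers.append(number)
--     return min(numbers)
-- ===== SOURCE B (Python) =====
-- def min_by(objects, iteratee):
--     """min_by: single streaming pass, no intermediate list and no helper."""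
--     best = None
--     for obj in objects:
--         value = obj[iteratee]
--         if best is None or value < best:
--             best = value
--     return best
-- ===== Notes on version B (the rewrite author's own statement) =====
-- stated objective: simpler
-- what changed: B drops A's build-a-list-then-call-min decomposition and computes the minimum in one streaming pass with an Option accumulator (None = not seen yet), with no intermediate list, no float('inf') sentinel and no emptiness guard.
import Mathlib
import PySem

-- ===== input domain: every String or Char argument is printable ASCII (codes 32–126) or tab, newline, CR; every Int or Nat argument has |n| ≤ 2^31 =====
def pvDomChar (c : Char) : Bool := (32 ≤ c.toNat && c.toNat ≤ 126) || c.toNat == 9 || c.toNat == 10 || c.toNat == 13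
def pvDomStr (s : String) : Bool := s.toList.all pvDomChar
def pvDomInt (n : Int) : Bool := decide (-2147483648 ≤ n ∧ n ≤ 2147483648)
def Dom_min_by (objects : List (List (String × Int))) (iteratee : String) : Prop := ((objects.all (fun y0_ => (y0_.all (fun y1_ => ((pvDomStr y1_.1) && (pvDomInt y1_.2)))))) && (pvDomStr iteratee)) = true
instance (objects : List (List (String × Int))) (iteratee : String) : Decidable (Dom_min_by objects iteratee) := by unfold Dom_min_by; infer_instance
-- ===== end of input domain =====

-- B replaces A's build-list-then-min decomposition by one streaming pass with an Option
-- accumulator (simpler; same asymptotic cost).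
-- Both ports total the KeyError-raising lookup obj[iteratee] with '.getD 0'; Pre_min_by
-- guarantees the key is present in every object, so the default is never used there.

-- ===== PORT A =====
-- dict lookup obj[iteratee]: first match in the association list (KeyError = none, totalled by getD in the ports)
def pyLookup (obj : List (String × Int)) (k : String) : Option Int :=
  match obj with
  | [] => none
  | (k', v) :: rest => if k' == k then some v else pyLookup rest k

-- A's helper 'min': float('inf') start is modelled as 'none' ('n < inf' is always true);
-- on a non-empty list the accumulator is 'some' from the first iteration on, so this is exact.
def pyMin (numbers : List Int) : Option Int :=
  if numbers.length == 0 then none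
  else
    numbers.foldl
      (fun mv n =>
        match mv with
        | none => some n
        | some m => if n < m then some n else some m)
      none

def min_by (objects : List (List (String × Int))) (iteratee : String) : Option Int :=
  if objects.length == 0 then none
  else
    let numbers := objects.foldl (fun acc obj => acc ++ [(pyLookup obj iteratee).getD 0]) []
    pyMin numbers

-- ===== PORT B =====
-- streaming pass: best = None; for obj in objects: update best
def minByGo (objects : List (List (String × Int))) (iteratee : String) (best : Option Int) : Option Int :=
  match objects with
  | [] => best
  | obj :: rest =>
    let value := (pyLookup obj iteratee).getD 0
    let best' := match best with
      | none => some value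
      | some b => if value < b then some value else some b
    minByGo rest iteratee best'

def min_by_alt (objects : List (List (String × Int))) (iteratee : String) : Option Int :=
  minByGo objects iteratee none

-- ===== PRECONDITION & SPEC =====
-- A raises KeyError when some object lacks the iteratee key; Pre_ excludes exactly those inputs.
def Pre_min_by (objects : List (List (String × Int))) (iteratee : String) : Prop :=
  ∀ obj ∈ objects, iteratee ∈ obj.map Prod.fst
instance (objects : List (List (String × Int))) (iteratee : String) : Decidable (Pre_min_by objects iteratee) := by unfold Pre_min_by; infer_instance
def pvWitness_min_by : (List (List (String × Int))) × String := ([[("x", 3), ("y", 0)], [("x", 1)]], "x")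

def Spec_min_by (objects : List (List (String × Int))) (iteratee : String) (out : Option Int) : Prop := out = min_by_alt objects iteratee
instance (objects : List (List (String × Int))) (iteratee : String) (out : Option Int) : Decidable (Spec_min_by objects iteratee out) := by unfold Spec_min_by; infer_instance

-- ===== CLAIM (what is proved, stated in full; the proofs are below) =====
def Claim_equal_min_by : Prop := ∀ (objects : List (List (String × Int))) (iteratee : String), Dom_min_by objects iteratee → Pre_min_by objects iteratee → Spec_min_by objects iteratee (min_by objects iteratee)

-- ===== LEMMAS AND PROOFS =====

-- the single fold step shared by both sides once A's list-building is unfolded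
def step (mv : Option Int) (n : Int) : Option Int :=
  match mv with
  | none => some n
  | some m => if n < m then some n else some m

theorem buildList_eq_map (objects : List (List (String × Int))) (iteratee : String)
    (acc : List Int) :
    objects.foldl (fun acc obj => acc ++ [(pyLookup obj iteratee).getD 0]) acc
      = acc ++ objects.map (fun obj => (pyLookup obj iteratee).getD 0) := by
  induction objects generalizing acc with
  | nil => simp
  | cons o rest ih => simp [List.foldl, ih]

theorem minByGo_eq_foldl (objects : List (List (String × Int))) (iteratee : String)
    (best : Option Int) :
    minByGo objects iteratee best
      = (objects.map (fun obj => (pyLookup obj iteratee).getD 0)).foldl step best := by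
  induction objects generalizing best with
  | nil => rfl
  | cons o rest ih => simp [minByGo, ih, step]

-- ===== VERDICT (by name: the statement is the Claim_ definition above) =====
theorem min_by_spec : Claim_equal_min_by := by
  intro objects iteratee _ _
  unfold Spec_min_by min_by min_by_alt pyMin
  rw [minByGo_eq_foldl, buildList_eq_map]
  cases objects with
  | nil => simp
  | cons o rest =>
    simp only [List.length_cons, List.nil_append]
    rw [if_neg (by simp), if_neg (by simp)]
    rfl
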